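-- pv_equiv track=rewrite | github.com/MrBrantCode/unitest_baseline | mut_generate/mist_train_cf/cf_53734/solution.py | solve
-- ===== SOURCE A (Python) =====
-- def solve(lst, dict):
--     vowels = 'aeiouAEIOU'
--     output = []
--     for word in lst:
--         if len(word) > 4 and word not in dict:
--             vowel_dict = {v: word.count(v) for v in vowels if word.count(v) > 0}
--             output.append((word, vowel_dict))
--     return output
-- ===== SOURCE B (Python) =====
-- def solve(lst, dict):
--     vowels = 'aeiouAEIOU'
--     order = {v: i for i, v in enumerate(vowels)}
--     keys = set(dict)
--
--     def profile(word):
--         vs = sorted((c for c in word if c in order), key=lambda c: order[c])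
--         d = {}
--         while vs:
--             c = vs[0]
--             run = 1
--             while run < len(vs) and vs[run] == c:
--                 run += 1
--             d[c] = run
--             vs = vs[run:]
--         return d
--
--     return [(word, profile(word)) for word in lst if len(word) > 4 and word not in keys]
-- ===== Notes on version B (the rewrite author's own statement) =====
-- stated objective: alternative
-- what changed: A counts each of the 10 vowels with a separate word.count(v) scan; B instead sorts the word's vowels by a fixed vowel-index key and run-length encodes the sorted list into the dict, with a comprehension-based outer filter.
import Mathlib
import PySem

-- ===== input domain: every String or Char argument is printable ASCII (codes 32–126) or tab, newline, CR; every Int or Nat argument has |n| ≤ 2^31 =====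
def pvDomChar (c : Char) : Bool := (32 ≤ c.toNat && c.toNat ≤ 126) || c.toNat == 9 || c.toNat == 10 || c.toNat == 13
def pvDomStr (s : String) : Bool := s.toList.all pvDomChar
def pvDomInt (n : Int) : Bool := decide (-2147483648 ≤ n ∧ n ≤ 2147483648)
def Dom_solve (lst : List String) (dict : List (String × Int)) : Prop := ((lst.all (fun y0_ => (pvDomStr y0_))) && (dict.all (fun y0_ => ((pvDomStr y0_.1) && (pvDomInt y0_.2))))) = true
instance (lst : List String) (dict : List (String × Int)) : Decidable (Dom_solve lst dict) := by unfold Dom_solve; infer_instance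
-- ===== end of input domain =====

-- B replaces A's per-vowel word.count scans by a different algorithm: sort the word's
-- vowels by a fixed vowel-index key and run-length encode the sorted list (alternative).

-- ===== PORT A =====
-- vowels = 'aeiouAEIOU' (iterating a Python str yields its 1-char strings; we fold over its chars and key by the 1-char string)
def pvVowels : List Char := "aeiouAEIOU".toList

def solve (lst : List String) (dict : List (String × Int)) : List (String × (List (String × Int))) :=
  lst.foldl (fun output word =>
    if PySem.Str.len word > 4 ∧ ¬ ((PySem.Dict.mk dict).contains word = true) then
      output ++ [(word,
        (pvVowels.foldl (fun d v =>
          if PySem.Str.count word (String.ofList [v]) > 0 then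
            d.insert (String.ofList [v]) ((PySem.Str.count word (String.ofList [v]) : Int))
          else d) (PySem.Dict.empty : PySem.Dict String Int)).items)]
    else output) []

-- ===== PORT B =====
-- order = {v: i for i, v in enumerate(vowels)}
def pvOrder : PySem.Dict Char Int :=
  PySem.Dict.ofList ((PySem.List.enumerate pvVowels).map (fun p => (p.2, p.1)))

-- key=lambda c: order[c]; ported total via getD (the sort input is filtered to keys of order, where it is exact)
def pvKey (c : Char) : Int := pvOrder.getD c 0

-- the while loop over the sorted vowel list: take one maximal run (the inner 'while vs[run] == c' scan),
-- record its char and length, continue on the rest (vs = vs[run:]); hand port, exact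
def pvRle : List Char → PySem.Dict String Int → PySem.Dict String Int
  | [], d => d
  | c :: rest, d =>
      pvRle (rest.dropWhile (· == c))
        (d.insert (String.ofList [c]) (((rest.takeWhile (· == c)).length + 1 : Nat) : Int))
  termination_by vs _ => vs.length
  decreasing_by
    simp only [List.length_cons]
    exact Nat.lt_succ_of_le (List.length_dropWhile_le _ _)

def solve_alt (lst : List String) (dict : List (String × Int)) : List (String × (List (String × Int))) :=
  let keys : List String := PySem.Set.ofList (dict.map (·.1))
  (lst.filter (fun w => decide (PySem.Str.len w > 4 ∧ ¬ (w ∈ keys)))).map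
    (fun w =>
      (w, (pvRle (PySem.List.sorted (w.toList.filter (fun c => pvOrder.contains c)) pvKey false)
            (PySem.Dict.empty : PySem.Dict String Int)).items))

-- ===== PRECONDITION & SPEC =====
def Spec_solve (lst : List String) (dict : List (String × Int)) (out : List (String × (List (String × Int)))) : Prop := out = solve_alt lst dict
instance (lst : List String) (dict : List (String × Int)) (out : List (String × (List (String × Int)))) : Decidable (Spec_solve lst dict out) := by unfold Spec_solve; infer_instance

-- ===== CLAIM (what is proved, stated in full; the proofs are below) =====
def Claim_equal_solve : Prop := ∀ (lst : List String) (dict : List (String × Int)), Dom_solve lst dict → Spec_solve lst dict (solve lst dict)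

-- ===== LEMMAS AND PROOFS =====

-- the word's vowels grouped in vowel order: what sorting by pvKey produces
def pvGroups (w : List Char) : List Char :=
  pvVowels.flatMap (fun v => List.replicate (w.count v) v)

-- Python's word.count(v) for a single character v is the character count.
theorem chars_count_go_singleton (c : Char) (s : List Char) (fuel acc : Nat)
    (h : s.length ≤ fuel) : PySem.Chars.count.go [c] fuel s acc = acc + s.count c := by
  induction s generalizing fuel acc with
  | nil => cases fuel <;> simp [PySem.Chars.count.go]
  | cons a t ih =>
    cases fuel with
    | zero => simp at h
    | succ n =>
      simp only [PySem.Chars.count.go, List.isPrefixOf]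
      rw [List.length_cons] at h
      by_cases hac : c = a
      · subst hac
        simp only [BEq.rfl, Bool.true_and, if_pos]
        rw [show List.drop (List.length [c]) (c :: t) = t by simp]
        rw [ih n (acc + 1) (by omega)]
        simp
        omega
      · have hba : (c == a) = false := by simp [hac]
        simp only [hba, Bool.false_and, if_neg Bool.false_ne_true]
        rw [ih n acc (by omega)]
        simp [Ne.symm hac]

theorem chars_count_singleton (s : List Char) (c : Char) :
    PySem.Chars.count s [c] = s.count c := by
  simp only [PySem.Chars.count, List.isEmpty_cons, if_neg Bool.false_ne_true]
  rw [chars_count_go_singleton c s s.length 0 (le_refl _)]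
  omega

theorem str_count_singleton (w : String) (c : Char) :
    PySem.Str.count w (String.ofList [c]) = w.toList.count c := by
  rw [PySem.Str.count_eq]
  simp only [String.toList_ofList]
  exact chars_count_singleton w.toList c

-- 'word not in dict' tested on the Dict vs. on the set of its keys
theorem cond_eq (dict : List (String × Int)) (word : String) :
    ((PySem.Dict.mk dict).contains word = true) ↔ (word ∈ (PySem.Set.ofList (dict.map (·.1)) : List String)) := by
  rw [PySem.Dict.contains_mk, PySem.Set.mem_ofList]
  simp [List.any_eq_true]

set_option maxRecDepth 100000 in
theorem pvOrder_keys : pvOrder.keys = pvVowels := by decide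

theorem pvOrder_contains (c : Char) : pvOrder.contains c = decide (c ∈ pvVowels) := by
  rw [PySem.Dict.contains_eq_decide_mem_keys, pvOrder_keys]

set_option maxRecDepth 100000 in
theorem pvOrder_eq : pvOrder = PySem.Dict.mk [('a',0),('e',1),('i',2),('o',3),('u',4),('A',5),('E',6),('I',7),('O',8),('U',9)] := by decide

set_option maxRecDepth 100000 in
theorem vkey_inj_bool : (pvVowels.all (fun a => pvVowels.all (fun b => pvKey a != pvKey b || a == b))) = true := by
  simp only [pvKey, pvOrder_eq]; decide

theorem vkey_inj : ∀ a ∈ pvVowels, ∀ b ∈ pvVowels, pvKey a = pvKey b → a = b := by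
  intro a ha b hb h
  have h1 := List.all_eq_true.mp vkey_inj_bool a ha
  have h2 := List.all_eq_true.mp h1 b hb
  simp only [bne, Bool.or_eq_true, Bool.not_eq_true', beq_eq_false_iff_ne, beq_iff_eq] at h2
  rcases h2 with h' | h'
  · exact absurd h h'
  · exact h'

set_option maxRecDepth 100000 in
theorem vkey_strict : pvVowels.Pairwise (fun a b => pvKey a < pvKey b) := by
  simp only [pvKey, pvOrder_eq]; decide

-- counting in the grouped list
theorem count_flatMap_replicate (V : List Char) (hV : V.Nodup) (n : Char → Nat) (c : Char) :
    (V.flatMap (fun v => List.replicate (n v) v)).count c = if c ∈ V then n c else 0 := by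
  induction V with
  | nil => simp
  | cons v V ih =>
    rcases List.nodup_cons.mp hV with ⟨hvV, hV'⟩
    simp only [List.flatMap_cons, List.count_append, ih hV', List.count_replicate, List.mem_cons]
    by_cases hcv : c = v
    · subst hcv
      simp [hvV]
    · have : (v == c) = false := by simp [Ne.symm hcv]
      simp [this, hcv]

theorem pairwise_le_flatMap (V : List Char) (hV : V.Pairwise (fun a b => pvKey a < pvKey b))
    (n : Char → Nat) :
    (V.flatMap (fun v => List.replicate (n v) v)).Pairwise (fun a b => pvKey a ≤ pvKey b) := by
  induction V with
  | nil => simp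
  | cons v V ih =>
    rcases List.pairwise_cons.mp hV with ⟨hv, hV'⟩
    simp only [List.flatMap_cons]
    rw [List.pairwise_append]
    refine ⟨List.pairwise_replicate.mpr (Or.inr le_rfl), ih hV', ?_⟩
    intro a ha b hb
    rcases List.mem_flatMap.mp hb with ⟨u, hu, hbu⟩
    rw [List.eq_of_mem_replicate ha, List.eq_of_mem_replicate hbu]
    exact le_of_lt (hv u hu)

theorem filter_perm_pvGroups (w : List Char) :
    (w.filter (fun c => decide (c ∈ pvVowels))).Perm (pvGroups w) := by
  rw [List.perm_iff_count]
  intro c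
  rw [pvGroups, count_flatMap_replicate _ (by decide) _ c]
  by_cases hc : c ∈ pvVowels
  · rw [if_pos hc, List.count_filter (by simp [hc])]
  · rw [if_neg hc, List.count_eq_zero]
    intro hmem
    exact hc (by simpa using (List.mem_filter.mp hmem).2)

-- sorting the word's vowels by the vowel-index key groups them in vowel order
theorem sorted_eq_pvGroups (w : List Char) :
    PySem.List.sorted (w.filter (fun c => pvOrder.contains c)) pvKey false = pvGroups w := by
  have hf : w.filter (fun c => pvOrder.contains c) = w.filter (fun c => decide (c ∈ pvVowels)) := by
    apply List.filter_congr
    intro c _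
    exact pvOrder_contains c
  rw [hf]
  have hperm : (PySem.List.sorted (w.filter (fun c => decide (c ∈ pvVowels))) pvKey false).Perm (pvGroups w) :=
    (PySem.List.sorted_perm _ _ _).trans (filter_perm_pvGroups w)
  refine List.Perm.eq_of_pairwise ?_ (PySem.List.sorted_pairwise _ _) (pairwise_le_flatMap _ vkey_strict _) hperm
  intro a b ha hb hab hba
  have ha' : a ∈ pvVowels := by
    have := (PySem.List.sorted_perm (w.filter (fun c => decide (c ∈ pvVowels))) pvKey false).mem_iff.mp ha
    simpa using (List.mem_filter.mp this).2
  have hb' : b ∈ pvVowels := by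
    rcases List.mem_flatMap.mp hb with ⟨u, hu, hbu⟩
    rw [List.eq_of_mem_replicate hbu]; exact hu
  exact vkey_inj a ha' b hb' (le_antisymm hab hba)

theorem takeWhile_flatMap_nil (V : List Char) (n : Char → Nat) (v : Char) (hv : v ∉ V) :
    (V.flatMap (fun u => List.replicate (n u) u)).takeWhile (· == v) = [] := by
  induction V with
  | nil => simp
  | cons u V ih =>
    have huv : u ≠ v := fun h => hv (h ▸ List.mem_cons_self)
    have hv' : v ∉ V := fun h => hv (List.mem_cons_of_mem _ h)
    simp only [List.flatMap_cons]
    cases hn : n u with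
    | zero => simpa using ih hv'
    | succ k =>
      simp [List.replicate_succ, huv]

theorem tw_dw (v : Char) (k : Nat) (rest : List Char) (h : rest.takeWhile (· == v) = []) :
    (List.replicate k v ++ rest).takeWhile (· == v) = List.replicate k v ∧
    (List.replicate k v ++ rest).dropWhile (· == v) = rest := by
  induction k with
  | zero =>
    refine ⟨by simpa using h, ?_⟩
    have := List.takeWhile_append_dropWhile (p := (· == v)) (l := rest)
    rw [h] at this
    simpa using this
  | succ k ih =>
    simp [List.replicate_succ, ih.1, ih.2]

theorem pvRle_group (v : Char) (k : Nat) (rest : List Char) (d : PySem.Dict String Int)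
    (h : rest.takeWhile (· == v) = []) :
    pvRle (v :: (List.replicate k v ++ rest)) d
      = pvRle rest (d.insert (String.ofList [v]) (((k + 1 : Nat)) : Int)) := by
  rw [pvRle]
  rw [(tw_dw v k rest h).1, (tw_dw v k rest h).2, List.length_replicate]

theorem rle_flatMap (V : List Char) (hV : V.Nodup) (n : Char → Nat) (d : PySem.Dict String Int) :
    pvRle (V.flatMap (fun v => List.replicate (n v) v)) d
      = V.foldl (fun d v => if 0 < n v then d.insert (String.ofList [v]) ((n v : Nat) : Int) else d) d := by
  induction V generalizing d with
  | nil => simp [pvRle]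
  | cons v V ih =>
    rcases List.nodup_cons.mp hV with ⟨hvV, hV'⟩
    simp only [List.flatMap_cons, List.foldl_cons]
    cases hn : n v with
    | zero =>
      simp only [List.replicate_zero, List.nil_append]
      rw [if_neg (by omega)]
      exact ih hV' d
    | succ k =>
      rw [List.replicate_succ, List.cons_append,
        pvRle_group v k _ d (takeWhile_flatMap_nil V n v hvV),
        if_pos (by omega)]
      exact ih hV' _

-- per word, A's vowel dict equals B's sort-and-run-length-encode dict
theorem inner_eq (w : String) :
    (pvVowels.foldl (fun d v =>
      if PySem.Str.count w (String.ofList [v]) > 0 then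
        d.insert (String.ofList [v]) ((PySem.Str.count w (String.ofList [v]) : Int))
      else d) (PySem.Dict.empty : PySem.Dict String Int))
    = pvRle (PySem.List.sorted (w.toList.filter (fun c => pvOrder.contains c)) pvKey false)
        (PySem.Dict.empty : PySem.Dict String Int) := by
  rw [sorted_eq_pvGroups, pvGroups, rle_flatMap _ (by decide)]
  apply PySem.List.foldl_congr_mem
  intro d v _
  rw [str_count_singleton]

-- ===== VERDICT (by name: the statement is the Claim_ definition above) =====
theorem solve_spec : Claim_equal_solve := by
  intro lst dict _
  unfold Spec_solve solve solve_alt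
  rw [PySem.List.foldl_append_ite
    (p := fun word => PySem.Str.len word > 4 ∧ ¬ ((PySem.Dict.mk dict).contains word = true))]
  rw [List.nil_append]
  have hfilter : lst.filter (fun word => decide (PySem.Str.len word > 4 ∧ ¬ ((PySem.Dict.mk dict).contains word = true)))
      = lst.filter (fun w => decide (PySem.Str.len w > 4 ∧ ¬ (w ∈ (PySem.Set.ofList (dict.map (·.1)) : List String)))) := by
    apply List.filter_congr
    intro w _
    simp only [decide_eq_decide]
    constructor
    · rintro ⟨h1, h2⟩; exact ⟨h1, fun hm => h2 ((cond_eq dict w).mpr hm)⟩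
    · rintro ⟨h1, h2⟩; exact ⟨h1, fun hm => h2 ((cond_eq dict w).mp hm)⟩
  rw [hfilter]
  apply List.map_congr_left
  intro w _
  rw [inner_eq]
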